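-- pv_equiv track=rewrite | github.com/Wiradhika6051/Oven-Pintar | main.py | iterasi_matriks
-- ===== SOURCE A (Python) =====
-- def iterasi_matriks(matriks,jumlah_iterasi):
--     """
--     Fungsi untuk mencari nilai elemen di suatu matriks dengan input total perulangan yang dilakukan(int) dan matriks(tipe data elemen bebas), lalu
--     mengembalikan nilai dari elemen tersebut(tipe data bebas)
--     """
--     #Variabel lokal
--     iterasi = 0                                 #Kounter untuk iterasi
--     nilai = 0                                   #Isi elemen yang dicari
--     #Melakukan looping di dalam matriks untuk setiap baris dan kolom
--     for i in matriks:
--         for j in i: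
--             if(iterasi == jumlah_iterasi):      #Jika jumlah iterasi fungsi sama dengan jumlah iterasi untuk mendapatkan nilai
--                 nilai = j                       #Memperbaharui nilai isi elemen
--             iterasi += 1                        #Setiap pengulangan kolom,nilai iterasi bertambah 1
--     return nilai                                #Mengembalikan nilai berupa isi elemen yang dicari
-- ===== SOURCE B (Python) =====
-- def iterasi_matriks(matriks, jumlah_iterasi):
--     # Skip whole rows by their length, then index directly into the target row.
--     if jumlah_iterasi >= 0:
--         k = jumlah_iterasi
--         for baris in matriks:
--             if k < len(baris):
--                 return baris[k]
--             k -= len(baris)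
--     return 0
-- ===== Notes on version B (the rewrite author's own statement) =====
-- stated objective: alternative
-- what changed: Instead of scanning every element while counting iterations, B skips whole rows by subtracting their lengths and then indexes directly into the target row (early return), returning 0 for negative or out-of-range indices just as A does.
import Mathlib
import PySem

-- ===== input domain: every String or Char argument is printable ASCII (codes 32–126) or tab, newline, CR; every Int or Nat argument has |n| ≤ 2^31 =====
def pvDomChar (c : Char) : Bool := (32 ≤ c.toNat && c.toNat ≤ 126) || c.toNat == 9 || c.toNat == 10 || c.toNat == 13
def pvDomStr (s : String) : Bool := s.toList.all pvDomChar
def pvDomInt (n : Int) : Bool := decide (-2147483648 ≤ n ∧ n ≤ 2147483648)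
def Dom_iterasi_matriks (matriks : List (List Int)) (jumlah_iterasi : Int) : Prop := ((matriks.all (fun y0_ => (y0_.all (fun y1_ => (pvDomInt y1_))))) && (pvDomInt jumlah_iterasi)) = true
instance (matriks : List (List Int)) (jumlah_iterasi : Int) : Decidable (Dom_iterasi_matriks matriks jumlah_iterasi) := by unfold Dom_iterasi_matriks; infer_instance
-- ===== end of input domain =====

-- B locates the target row by accumulating row lengths instead of scanning every element; same return value, including 0 when the index is negative or out of range.
-- ===== PORT A =====
def iterasi_matriks (matriks : List (List Int)) (jumlah_iterasi : Int) : Int :=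
  (matriks.foldl
    (fun (s : Int × Int) (i : List Int) =>
      i.foldl (fun (p : Int × Int) (j : Int) =>
        (p.1 + 1, if p.1 = jumlah_iterasi then j else p.2)) s)
    (0, 0)).2

-- ===== PORT B =====
def iterasiAltGo (rows : List (List Int)) (k : Int) : Int :=
  match rows with
  | [] => 0
  | baris :: rest =>
    if k < (baris.length : Int) then (PySem.List.pyGet? baris k).getD 0
    else iterasiAltGo rest (k - baris.length)

def iterasi_matriks_alt (matriks : List (List Int)) (jumlah_iterasi : Int) : Int :=
  if 0 ≤ jumlah_iterasi then iterasiAltGo matriks jumlah_iterasi else 0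

-- ===== PRECONDITION & SPEC =====
def Spec_iterasi_matriks (matriks : List (List Int)) (jumlah_iterasi : Int) (out : Int) : Prop := out = iterasi_matriks_alt matriks jumlah_iterasi
instance (matriks : List (List Int)) (jumlah_iterasi : Int) (out : Int) : Decidable (Spec_iterasi_matriks matriks jumlah_iterasi out) := by unfold Spec_iterasi_matriks; infer_instance

-- ===== CLAIM (what is proved, stated in full; the proofs are below) =====
def Claim_equal_iterasi_matriks : Prop := ∀ (matriks : List (List Int)) (jumlah_iterasi : Int), Dom_iterasi_matriks matriks jumlah_iterasi → Spec_iterasi_matriks matriks jumlah_iterasi (iterasi_matriks matriks jumlah_iterasi)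

-- ===== LEMMAS AND PROOFS =====

theorem innerA (l : List Int) (jt i n : Int) (hi : 0 ≤ i) :
    l.foldl (fun (p : Int × Int) (j : Int) =>
        (p.1 + 1, if p.1 = jt then j else p.2)) (i, n)
      = (i + l.length,
         if i ≤ jt ∧ jt < i + l.length
         then (l[(jt - i).toNat]?).getD n else n) := by
  induction l generalizing i n with
  | nil =>
    simp only [List.foldl_nil, List.length_nil, Int.natCast_zero, add_zero]
    have : ¬ (i ≤ jt ∧ jt < i) := by omega
    simp [this]
  | cons x xs ih =>
    simp only [List.foldl_cons]
    rw [ih (i + 1) _ (by omega)]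
    simp only [List.length_cons, Prod.mk.injEq]
    refine ⟨by push_cast; ring, ?_⟩
    by_cases h2 : i + 1 ≤ jt ∧ jt < i + 1 + (xs.length : Int)
    · obtain ⟨h2a, h2b⟩ := h2
      have h3 : i ≤ jt ∧ jt < i + ((xs.length + 1 : Nat) : Int) := by omega
      have hlt : (jt - (i + 1)).toNat < xs.length := by omega
      have hidx : (jt - i).toNat = (jt - (i + 1)).toNat + 1 := by omega
      rw [if_pos ⟨h2a, h2b⟩, if_pos h3, hidx, List.getElem?_cons_succ,
          List.getElem?_eq_getElem hlt]
      simp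
    · rw [if_neg h2]
      by_cases hx : i = jt
      · have h3 : i ≤ jt ∧ jt < i + ((xs.length + 1 : Nat) : Int) := by omega
        have h0 : (jt - i).toNat = 0 := by omega
        rw [if_pos h3, if_pos hx, h0]
        simp
      · have h3 : ¬ (i ≤ jt ∧ jt < i + ((xs.length + 1 : Nat) : Int)) := by omega
        rw [if_neg h3, if_neg hx]

-- B's helper: skipping whole rows equals indexing into the flattened matrix
theorem altGo_spec (rows : List (List Int)) (k : Int) (hk : 0 ≤ k) :
    iterasiAltGo rows k
      = if k < (rows.flatten.length : Int)
        then (rows.flatten[k.toNat]?).getD 0 else 0 := by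
  induction rows generalizing k with
  | nil =>
    simp only [iterasiAltGo, List.flatten_nil, List.length_nil, Int.natCast_zero]
    have : ¬ k < 0 := by omega
    simp [this]
  | cons r rs ih =>
    simp only [iterasiAltGo, List.flatten_cons]
    have hlen : ((r ++ rs.flatten).length : Int)
        = (r.length : Int) + (rs.flatten.length : Int) := by
      push_cast [List.length_append]; ring
    by_cases h : k < (r.length : Int)
    · have hlt : k.toNat < r.length := by omega
      have hin : k < ((r ++ rs.flatten).length : Int) := by omega
      rw [if_pos h, if_pos hin, PySem.List.pyGet?_of_nonneg _ hk,
          List.getElem?_append_left hlt]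
    · rw [if_neg h, ih (k - r.length) (by omega)]
      have hge : r.length ≤ k.toNat := by omega
      have hNat : (k - (r.length : Int)).toNat = k.toNat - r.length := by omega
      rw [hNat, List.getElem?_append_right hge]
      by_cases h4 : k - (r.length : Int) < (rs.flatten.length : Int)
      · rw [if_pos h4, if_pos (by omega)]
      · rw [if_neg h4, if_neg (by omega)]

-- A's outer loop: same characterisation over the flattened matrix
theorem outerA (rows : List (List Int)) (jt i n : Int) (hi : 0 ≤ i) :
    rows.foldl (fun (s : Int × Int) (r : List Int) =>
        r.foldl (fun (p : Int × Int) (j : Int) =>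
          (p.1 + 1, if p.1 = jt then j else p.2)) s) (i, n)
      = (i + rows.flatten.length,
         if i ≤ jt ∧ jt < i + rows.flatten.length
         then (rows.flatten[(jt - i).toNat]?).getD n else n) := by
  induction rows generalizing i n with
  | nil =>
    simp only [List.foldl_nil, List.flatten_nil, List.length_nil, Int.natCast_zero, add_zero]
    have : ¬ (i ≤ jt ∧ jt < i) := by omega
    simp [this]
  | cons r rs ih =>
    simp only [List.foldl_cons, List.flatten_cons]
    rw [innerA r jt i n hi, ih _ _ (by omega)]
    have hlen : ((r ++ rs.flatten).length : Int)
        = (r.length : Int) + (rs.flatten.length : Int) := by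
      push_cast [List.length_append]; ring
    simp only [Prod.mk.injEq]
    refine ⟨by omega, ?_⟩
    by_cases hA : i + (r.length : Int) ≤ jt ∧ jt < i + (r.length : Int) + (rs.flatten.length : Int)
    · have hC : i ≤ jt ∧ jt < i + ((r ++ rs.flatten).length : Int) := by omega
      have hlt : (jt - (i + (r.length : Int))).toNat < rs.flatten.length := by omega
      have hge : r.length ≤ (jt - i).toNat := by omega
      have hidx : (jt - i).toNat - r.length = (jt - (i + (r.length : Int))).toNat := by omega
      rw [if_pos hA, if_pos hC, List.getElem?_append_right hge, hidx,
          List.getElem?_eq_getElem hlt]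
      simp
    · rw [if_neg hA]
      by_cases hB : i ≤ jt ∧ jt < i + (r.length : Int)
      · have hC : i ≤ jt ∧ jt < i + ((r ++ rs.flatten).length : Int) := by omega
        have hlt : (jt - i).toNat < r.length := by omega
        rw [if_pos hB, if_pos hC, List.getElem?_append_left hlt]
      · have hC : ¬ (i ≤ jt ∧ jt < i + ((r ++ rs.flatten).length : Int)) := by omega
        rw [if_neg hB, if_neg hC]

-- ===== VERDICT (by name: the statement is the Claim_ definition above) =====
theorem iterasi_matriks_spec : Claim_equal_iterasi_matriks := by
  intro m jt _
  unfold Spec_iterasi_matriks iterasi_matriks iterasi_matriks_alt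
  rw [outerA m jt 0 0 le_rfl]
  by_cases hj : 0 ≤ jt
  · rw [if_pos hj, altGo_spec m jt hj]
    simp only [zero_add, Int.sub_zero]
    by_cases h : jt < (m.flatten.length : Int)
    · rw [if_pos ⟨hj, h⟩, if_pos h]
    · rw [if_neg (by omega), if_neg h]
  · rw [if_neg hj, if_neg (by omega)]
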